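-- pv_equiv track=rewrite | github.com/JonusNattapong/ChujaiThainlp | thainlp/question_answering/qa_system.py | _rank_answers
-- ===== SOURCE A (Python) =====
-- from typing import List, Dict, Tuple, Union, Optional
--
-- def _rank_answers(answers: List[str], focus_words: List[str]) -> List[str]:
--     """
--     Rank answers based on relevance to focus words
--
--     Args:
--         answers (List[str]): List of candidate answers
--         focus_words (List[str]): Focus keywords from question
--
--     Returns:
--         List[str]: Ranked list of answers
--     """
--     if not answers:
--         return []
--
--     # Score each answer based on focus words
--     scored_answers = []
--     for answer in answers:
--         score = sum(1 for word in focus_words if word in answer)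
--         scored_answers.append((answer, score))
--
--     # Sort by score
--     scored_answers.sort(key=lambda x: x[1], reverse=True)
--
--     # Return ranked answers
--     return [answer for answer, _ in scored_answers]
-- ===== SOURCE B (Python) =====
-- def _rank_answers(answers, focus_words):
--     # Bucket (counting) sort on the bounded score 0..len(focus_words):
--     # fill buckets in original order, emit highest-score buckets first.
--     buckets = [[] for _ in range(len(focus_words) + 1)]
--     for answer in answers:
--         score = sum(1 for word in focus_words if word in answer)
--         buckets[score].append(answer)
--     ranked = []
--     for bucket in reversed(buckets):
--         ranked.extend(bucket)
--     return ranked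
-- ===== Notes on version B (the rewrite author's own statement) =====
-- stated objective: alternative
-- what changed: Replaces the comparison sort on (answer, score) pairs by a counting/bucket sort: answers are appended in original order to a bucket indexed by their bounded score and the buckets are concatenated from highest score down, preserving stable tie order.
import Mathlib
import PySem

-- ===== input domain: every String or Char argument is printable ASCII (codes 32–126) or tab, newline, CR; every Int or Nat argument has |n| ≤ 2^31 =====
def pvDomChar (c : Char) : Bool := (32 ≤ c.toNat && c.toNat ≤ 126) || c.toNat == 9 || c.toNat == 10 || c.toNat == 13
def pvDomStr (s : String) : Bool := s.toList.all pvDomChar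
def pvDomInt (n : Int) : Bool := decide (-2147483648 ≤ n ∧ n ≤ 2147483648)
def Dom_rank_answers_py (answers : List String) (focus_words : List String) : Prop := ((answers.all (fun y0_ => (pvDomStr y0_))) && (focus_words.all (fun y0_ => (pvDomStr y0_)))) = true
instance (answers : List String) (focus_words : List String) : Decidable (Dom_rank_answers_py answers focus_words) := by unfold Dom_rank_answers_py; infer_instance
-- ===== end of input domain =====

-- B replaces A's comparison sort by a stable counting/bucket sort on the bounded score (alternative algorithm, same overall cost).

-- ===== PORT A =====
-- score = sum(1 for word in focus_words if word in answer)
def pvScoreA (focus_words : List String) (answer : String) : Int :=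
  focus_words.foldl (fun acc word => if PySem.Str.isIn word answer then acc + 1 else acc) 0

def rank_answers_py (answers : List String) (focus_words : List String) : List String :=
  if answers = [] then []
  else
    let scored_answers := answers.foldl (fun acc answer => acc ++ [(answer, pvScoreA focus_words answer)]) []
    let scored_sorted := PySem.List.sorted scored_answers (fun x => x.2) true
    scored_sorted.map (fun p => p.1)

-- ===== PORT B =====
-- same score expression, as the Nat used to index the bucket list
def pvScoreB (focus_words : List String) (answer : String) : Nat :=
  focus_words.foldl (fun acc word => if PySem.Str.isIn word answer then acc + 1 else acc) 0

def rank_answers_py_alt (answers : List String) (focus_words : List String) : List String :=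
  let buckets := answers.foldl
    (fun bs answer =>
      let score := pvScoreB focus_words answer
      bs.set score (bs.getD score [] ++ [answer]))
    (List.replicate (focus_words.length + 1) ([] : List String))
  buckets.reverse.foldl (fun ranked bucket => ranked ++ bucket) []

-- ===== PRECONDITION & SPEC =====
def Spec_rank_answers_py (answers : List String) (focus_words : List String) (out : List String) : Prop := out = rank_answers_py_alt answers focus_words
instance (answers : List String) (focus_words : List String) (out : List String) : Decidable (Spec_rank_answers_py answers focus_words out) := by unfold Spec_rank_answers_py; infer_instance

-- ===== CLAIM (what is proved, stated in full; the proofs are below) =====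
def Claim_equal_rank_answers_py : Prop := ∀ (answers : List String) (focus_words : List String), Dom_rank_answers_py answers focus_words → Spec_rank_answers_py answers focus_words (rank_answers_py answers focus_words)

-- ===== LEMMAS AND PROOFS =====

-- answers of score k-1, then k-2, …, then 0 (descending-score concatenation)
def pvDesc (fw : List String) (k : Nat) (xs : List String) : List String :=
  match k with
  | 0 => []
  | k+1 => xs.filter (fun a => pvScoreB fw a == k) ++ pvDesc fw k xs

lemma pvScoreA_eq (fw : List String) (a : String) : pvScoreA fw a = ((pvScoreB fw a : Nat) : Int) := by
  unfold pvScoreA pvScoreB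
  suffices h : ∀ (l : List String) (init : Nat),
      l.foldl (fun acc word => if PySem.Str.isIn word a then acc + 1 else acc) ((init : Nat) : Int)
        = ((l.foldl (fun acc word => if PySem.Str.isIn word a then acc + 1 else acc) init : Nat) : Int) by
    exact_mod_cast h fw 0
  intro l
  induction l with
  | nil => intro init; simp
  | cons w t ih =>
    intro init
    cases hw : PySem.Str.isIn w a with
    | true =>
      simp only [List.foldl_cons, hw, if_true]
      rw [show ((init : Int) + 1) = ((init + 1 : Nat) : Int) by push_cast; ring]
      exact ih (init + 1)
    | false =>
      simp only [List.foldl_cons, hw, Bool.false_eq_true, if_false]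
      exact ih init

lemma pvScoreB_le (fw : List String) (a : String) : pvScoreB fw a ≤ fw.length := by
  unfold pvScoreB
  suffices h : ∀ (l : List String) (init : Nat),
      l.foldl (fun acc word => if PySem.Str.isIn word a then acc + 1 else acc) init ≤ init + l.length by
    simpa using h fw 0
  intro l
  induction l with
  | nil => intro init; simp
  | cons w t ih =>
    intro init
    cases hw : PySem.Str.isIn w a with
    | true =>
      simp only [List.foldl_cons, hw, if_true, List.length_cons]
      calc _ ≤ (init + 1) + t.length := ih (init + 1)
        _ ≤ init + (t.length + 1) := by omega
    | false =>
      simp only [List.foldl_cons, hw, Bool.false_eq_true, if_false, List.length_cons]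
      calc _ ≤ init + t.length := ih init
        _ ≤ init + (t.length + 1) := by omega

lemma insertBy_append_not {α : Type} (before : α → α → Bool) (x : α) (hi t : List α)
    (h : ∀ y ∈ hi, before x y = false) :
    PySem.List.insertBy before x (hi ++ t) = hi ++ PySem.List.insertBy before x t := by
  induction hi with
  | nil => simp
  | cons y ys ih =>
    have hy := h y (by simp)
    simp only [List.cons_append, PySem.List.insertBy, hy, Bool.false_eq_true, if_false]
    rw [ih (fun z hz => h z (by simp [hz]))]

lemma insertBy_all_before {α : Type} (before : α → α → Bool) (x : α) (lo : List α)
    (h : ∀ y ∈ lo, before x y = true) :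
    PySem.List.insertBy before x lo = x :: lo := by
  cases lo with
  | nil => simp [PySem.List.insertBy]
  | cons y ys => simp [PySem.List.insertBy, h y (by simp)]

lemma pvDesc_nil (fw : List String) (k : Nat) : pvDesc fw k [] = [] := by
  induction k with
  | zero => rfl
  | succ k ih => simp [pvDesc, ih]

lemma pvDesc_mem_lt (fw : List String) (k : Nat) (xs : List String) (y : String)
    (h : y ∈ pvDesc fw k xs) : pvScoreB fw y < k := by
  induction k with
  | zero => simp [pvDesc] at h
  | succ k ih =>
    simp only [pvDesc, List.mem_append, List.mem_filter] at h
    rcases h with ⟨_, hy⟩ | hy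
    · have : pvScoreB fw y = k := by simpa using hy
      omega
    · have := ih hy; omega

lemma pvDesc_append_high (fw : List String) (k : Nat) (xs : List String) (a : String)
    (h : k ≤ pvScoreB fw a) : pvDesc fw k (xs ++ [a]) = pvDesc fw k xs := by
  induction k with
  | zero => rfl
  | succ k ih =>
    have hne : (pvScoreB fw a == k) = false := by
      simp only [beq_eq_false_iff_ne, ne_eq]; omega
    simp only [pvDesc, List.filter_append, List.filter_cons, hne, Bool.false_eq_true, if_false,
      List.filter_nil, List.append_nil]
    rw [ih (by omega)]

lemma pvDesc_insert (fw : List String) (k : Nat) (xs : List String) (a : String)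
    (h : pvScoreB fw a < k) :
    PySem.List.insertBy (fun p q => decide (q.2 < p.2)) (a, ((pvScoreB fw a : Nat) : Int))
        ((pvDesc fw k xs).map (fun b => (b, ((pvScoreB fw b : Nat) : Int))))
      = (pvDesc fw k (xs ++ [a])).map (fun b => (b, ((pvScoreB fw b : Nat) : Int))) := by
  induction k with
  | zero => omega
  | succ k ih =>
    by_cases hs : pvScoreB fw a = k
    · -- a lands in the head bucket: skip it (ties keep order), cons before the lower buckets
      have hhi : ∀ y ∈ (xs.filter (fun b => pvScoreB fw b == k)).map
          (fun b => (b, ((pvScoreB fw b : Nat) : Int))),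
          (decide (y.2 < ((pvScoreB fw a : Nat) : Int))) = false := by
        intro y hy
        simp only [List.mem_map, List.mem_filter] at hy
        obtain ⟨b, ⟨_, hb⟩, rfl⟩ := hy
        have hbk : pvScoreB fw b = k := by simpa using hb
        simp only [decide_eq_false_iff_not, not_lt]
        exact_mod_cast by omega
      have hlo : ∀ y ∈ (pvDesc fw k xs).map (fun b => (b, ((pvScoreB fw b : Nat) : Int))),
          (decide (y.2 < ((pvScoreB fw a : Nat) : Int))) = true := by
        intro y hy
        simp only [List.mem_map] at hy
        obtain ⟨b, hb, rfl⟩ := hy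
        have := pvDesc_mem_lt fw k xs b hb
        simp only [decide_eq_true_eq]
        exact_mod_cast by omega
      have heqk : (pvScoreB fw a == k) = true := by simp [hs]
      simp only [pvDesc, List.map_append]
      rw [insertBy_append_not _ _ _ _ hhi, insertBy_all_before _ _ _ hlo]
      rw [pvDesc_append_high fw k xs a (by omega)]
      simp [List.filter_append, List.filter_cons, heqk, hs]
    · -- a lands strictly below the head bucket
      have hhi : ∀ y ∈ (xs.filter (fun b => pvScoreB fw b == k)).map
          (fun b => (b, ((pvScoreB fw b : Nat) : Int))),
          (decide (y.2 < ((pvScoreB fw a : Nat) : Int))) = false := by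
        intro y hy
        simp only [List.mem_map, List.mem_filter] at hy
        obtain ⟨b, ⟨_, hb⟩, rfl⟩ := hy
        have hbk : pvScoreB fw b = k := by simpa using hb
        simp only [decide_eq_false_iff_not, not_lt]
        exact_mod_cast by omega
      have hne : (pvScoreB fw a == k) = false := by
        simp only [beq_eq_false_iff_ne, ne_eq]; omega
      simp only [pvDesc, List.map_append]
      rw [insertBy_append_not _ _ _ _ hhi, ih (by omega)]
      simp [List.filter_append, List.filter_cons, hne]

-- A's insertion-sort fold over the scored pairs builds exactly the descending-score concatenation
lemma foldl_insert_eq_pvDesc (fw : List String) (xs : List String) :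
    (xs.map (fun a => (a, ((pvScoreB fw a : Nat) : Int)))).foldl
        (fun acc x => PySem.List.insertBy (fun p q => decide (q.2 < p.2)) x acc) []
      = (pvDesc fw (fw.length + 1) xs).map (fun b => (b, ((pvScoreB fw b : Nat) : Int))) := by
  induction xs using List.reverseRecOn with
  | nil => simp [pvDesc_nil]
  | append_singleton xs a ih =>
    rw [List.map_append, List.foldl_append, ih]
    simp only [List.map_cons, List.map_nil, List.foldl_cons, List.foldl_nil]
    exact pvDesc_insert fw (fw.length + 1) xs a (by have := pvScoreB_le fw a; omega)

-- B's bucket fold computes the per-score filters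
lemma bucket_foldl_eq (fw : List String) (xs : List String) :
    xs.foldl
        (fun bs answer =>
          bs.set (pvScoreB fw answer) (bs.getD (pvScoreB fw answer) [] ++ [answer]))
        (List.replicate (fw.length + 1) ([] : List String))
      = (List.range (fw.length + 1)).map (fun i => xs.filter (fun a => pvScoreB fw a == i)) := by
  induction xs using List.reverseRecOn with
  | nil => simp [List.map_const']
  | append_singleton xs a ih =>
    rw [List.foldl_append, List.foldl_cons, List.foldl_nil, ih]
    have hs : pvScoreB fw a < fw.length + 1 := by have := pvScoreB_le fw a; omega
    apply List.ext_getElem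
    · simp
    · intro i h1 h2
      simp only [List.length_set, List.length_map, List.length_range] at h1
      rw [List.getElem_set]
      by_cases he : pvScoreB fw a = i
      · subst he
        rw [if_pos rfl, List.getD_eq_getElem _ _ (by simp [hs])]
        simp [List.filter_append, List.filter_cons]
      · rw [if_neg he]
        simp [List.filter_append, List.filter_cons, he]

-- concatenating the buckets from the top score down is pvDesc
lemma rev_flatten_eq_pvDesc (fw : List String) (xs : List String) (k : Nat) :
    (((List.range k).map (fun i => xs.filter (fun a => pvScoreB fw a == i))).reverse).flatten
      = pvDesc fw k xs := by
  induction k with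
  | zero => simp [pvDesc]
  | succ k ih =>
    rw [List.range_succ, List.map_append, List.reverse_append]
    simp only [List.map_cons, List.map_nil, List.reverse_cons, List.reverse_nil, List.nil_append,
      List.cons_append, List.flatten_cons]
    rw [ih]; rfl

lemma foldl_append_eq_flatten {α : Type} (l : List (List α)) (init : List α) :
    l.foldl (fun r b => r ++ b) init = init ++ l.flatten := by
  induction l generalizing init with
  | nil => simp
  | cons b t ih => simp [List.foldl_cons, ih]

-- ===== VERDICT (by name: the statement is the Claim_ definition above) =====
theorem rank_answers_py_spec : Claim_equal_rank_answers_py := by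
  unfold Claim_equal_rank_answers_py Spec_rank_answers_py
  intro answers focus_words _
  have hpair : (fun a => (a, pvScoreA focus_words a))
      = (fun a => (a, ((pvScoreB focus_words a : Nat) : Int))) := by
    funext a; rw [pvScoreA_eq]
  have hB : rank_answers_py_alt answers focus_words = pvDesc focus_words (focus_words.length + 1) answers := by
    unfold rank_answers_py_alt
    rw [bucket_foldl_eq, foldl_append_eq_flatten, List.nil_append,
      rev_flatten_eq_pvDesc]
  by_cases hnil : answers = []
  · subst hnil
    simp [rank_answers_py, hB, pvDesc_nil]
  · unfold rank_answers_py
    rw [if_neg hnil, hB]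
    simp only [PySem.List.foldl_append_singleton_eq_map, List.nil_append,
      PySem.List.sorted_rev_eq_foldl_insertBy, hpair, foldl_insert_eq_pvDesc]
    simp [Function.comp_def]
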